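-- pv_equiv track=rewrite | github.com/sby854905420-netizen/Schemalinking | Run/table2column.py | normalize_relevant_tables
-- ===== SOURCE A (Python) =====
-- from typing import Any, Sequence
--
-- def normalize_table_names(table_names: Sequence[Any]) -> list[str]:
--     normalized_table_names: list[str] = []
--     seen: set[str] = set()
--
--     for table_name in table_names:
--         normalized_table_name = str(table_name).strip()
--         if not normalized_table_name or normalized_table_name in seen:
--             continue
--         seen.add(normalized_table_name)
--         normalized_table_names.append(normalized_table_name)
--
--     return normalized_table_names
--
-- def normalize_relevant_tables(
--     relevant_table_list: Sequence[Any],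
--     available_records: Sequence[dict[str, Any]],
-- ) -> list[str]:
--     available_table_names = {
--         str(record.get("table_name", "")).strip()
--         for record in available_records
--         if str(record.get("table_name", "")).strip()
--     }
--
--     return [
--         table_name
--         for table_name in normalize_table_names(relevant_table_list)
--         if table_name in available_table_names
--     ]
-- ===== SOURCE B (Python) =====
-- from typing import Any, Sequence
--
-- def normalize_relevant_tables(
--     relevant_table_list: Sequence[Any],
--     available_records: Sequence[dict[str, Any]],
-- ) -> list[str]:
--     available_table_names = {
--         str(record.get("table_name", "")).strip()
--         for record in available_records
--         if str(record.get("table_name", "")).strip()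
--     }
--     stripped = [str(name).strip() for name in relevant_table_list]
--     first_index: dict[str, int] = {}
--     for i, s in enumerate(stripped):
--         first_index.setdefault(s, i)
--     return [
--         s
--         for i, s in enumerate(stripped)
--         if s and first_index[s] == i and s in available_table_names
--     ]
-- ===== Notes on version B (the rewrite author's own statement) =====
-- stated objective: alternative
-- what changed: B replaces A's stateful seen-set dedup loop (dedup list built first, availability filter applied after) with a stateless first-occurrence characterization: it strips all names once, builds a first-occurrence index map with setdefault, then selects in one comprehension the names that are non-empty, stand at their first-occurrence index, and are available.
import Mathlib
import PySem

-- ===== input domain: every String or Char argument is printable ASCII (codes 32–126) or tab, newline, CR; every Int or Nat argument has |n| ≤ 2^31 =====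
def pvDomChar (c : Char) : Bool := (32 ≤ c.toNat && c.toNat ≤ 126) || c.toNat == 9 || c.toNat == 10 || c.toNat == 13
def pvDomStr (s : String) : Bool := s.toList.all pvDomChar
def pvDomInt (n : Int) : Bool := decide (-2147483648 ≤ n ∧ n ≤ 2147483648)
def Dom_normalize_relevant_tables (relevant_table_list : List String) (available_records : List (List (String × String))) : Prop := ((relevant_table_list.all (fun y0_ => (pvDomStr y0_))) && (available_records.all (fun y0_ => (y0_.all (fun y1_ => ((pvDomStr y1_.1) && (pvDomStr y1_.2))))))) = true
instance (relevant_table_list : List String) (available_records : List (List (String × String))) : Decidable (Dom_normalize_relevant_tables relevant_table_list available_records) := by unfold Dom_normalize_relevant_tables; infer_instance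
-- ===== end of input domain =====

-- B replaces A's stateful seen-set dedup loop with a stateless first-occurrence test (list.index(name) == position) over the stripped list (objective: alternative).

-- ===== PORT A =====
-- helper normalize_table_names: dedup pass keeping first occurrences of non-empty stripped names
def normalize_table_names (table_names : List String) : List String :=
  (table_names.foldl
    (fun (st : List String × PySem.Set String) table_name =>
      let n := PySem.Str.strip table_name
      if n == "" || PySem.Set.contains st.2 n then st
      else (st.1 ++ [n], PySem.Set.add st.2 n))
    ([], PySem.Set.empty)).1

-- the set comprehension over available_records (record.get("table_name", "") = first-match lookup)
def pvAvailSet (available_records : List (List (String × String))) : PySem.Set String :=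
  PySem.Set.ofList
    ((available_records.map
        (fun record => PySem.Str.strip (PySem.Dict.getD (PySem.Dict.mk record) "table_name" ""))).filter
      (fun s => !(s == "")))

def normalize_relevant_tables (relevant_table_list : List String) (available_records : List (List (String × String))) : List String :=
  let available_table_names := pvAvailSet available_records
  (normalize_table_names relevant_table_list).filter
    (fun table_name => PySem.Set.contains available_table_names table_name)

-- ===== PORT B =====
-- the first_index loop: for i, s in enumerate(stripped): first_index.setdefault(s, i)
def pvFirstIndex (stripped : List String) : PySem.Dict String Int :=
  (PySem.List.enumerate stripped 0).foldl
    (fun d p => if PySem.Dict.contains d p.2 then d else PySem.Dict.insert d p.2 p.1)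
    PySem.Dict.empty

def normalize_relevant_tables_alt (relevant_table_list : List String) (available_records : List (List (String × String))) : List String :=
  let available_table_names := pvAvailSet available_records
  let stripped := relevant_table_list.map PySem.Str.strip
  let first_index := pvFirstIndex stripped
  ((PySem.List.enumerate stripped 0).filter
    (fun p => !(p.2 == "")
      && (PySem.Dict.get? first_index p.2 == some p.1)
      && PySem.Set.contains available_table_names p.2)).map (·.2)

-- ===== PRECONDITION & SPEC =====
def Spec_normalize_relevant_tables (relevant_table_list : List String) (available_records : List (List (String × String))) (out : List String) : Prop := out = normalize_relevant_tables_alt relevant_table_list available_records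
instance (relevant_table_list : List String) (available_records : List (List (String × String))) (out : List String) : Decidable (Spec_normalize_relevant_tables relevant_table_list available_records out) := by unfold Spec_normalize_relevant_tables; infer_instance

-- ===== CLAIM (what is proved, stated in full; the proofs are below) =====
def Claim_equal_normalize_relevant_tables : Prop := ∀ (relevant_table_list : List String) (available_records : List (List (String × String))), Dom_normalize_relevant_tables relevant_table_list available_records → Spec_normalize_relevant_tables relevant_table_list available_records (normalize_relevant_tables relevant_table_list available_records)

-- ===== LEMMAS AND PROOFS =====

-- recursive form of A's dedup loop
def pvDedup (seen : PySem.Set String) : List String → List String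
  | [] => []
  | x :: xs =>
    let n := PySem.Str.strip x
    if n == "" || PySem.Set.contains seen n then pvDedup seen xs
    else n :: pvDedup (PySem.Set.add seen n) xs

theorem pv_foldA (l : List String) (acc : List String) (seen : PySem.Set String) :
    (l.foldl
      (fun (st : List String × PySem.Set String) table_name =>
        let n := PySem.Str.strip table_name
        if n == "" || PySem.Set.contains st.2 n then st
        else (st.1 ++ [n], PySem.Set.add st.2 n))
      (acc, seen)).1 = acc ++ pvDedup seen l := by
  induction l generalizing acc seen with
  | nil => simp [pvDedup]
  | cons x xs ih =>
    simp only [List.foldl_cons, pvDedup]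
    by_cases h : (PySem.Str.strip x == "" || PySem.Set.contains seen (PySem.Str.strip x)) = true
    · simp only [if_pos h]; exact ih acc seen
    · simp only [if_neg h]; rw [ih]; simp

-- the core bridge: B's first-occurrence filter over the remaining suffix, with the processed
-- prefix `pre` of stripped names already in the list being indexed, equals the availability
-- filter of A's dedup of the suffix, provided `seen` contains exactly the non-empty names of `pre`.
theorem pv_core (q : String → Bool) (l : List String) (pre : List String) (seen : PySem.Set String)
    (hseen : ∀ s : String, s ≠ "" → (PySem.Set.contains seen s = true ↔ s ∈ pre)) :
    ((PySem.List.enumerate (l.map PySem.Str.strip) (pre.length : Int)).filter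
      (fun p => !(p.2 == "")
        && ((PySem.List.index? (pre ++ l.map PySem.Str.strip) p.2).map (fun k => (k : Int)) == some p.1)
        && q p.2)).map (·.2)
    = (pvDedup seen l).filter q := by
  induction l generalizing pre seen with
  | nil => simp [pvDedup]
  | cons x xs ih =>
    have hx : (x :: xs).map PySem.Str.strip = PySem.Str.strip x :: xs.map PySem.Str.strip := rfl
    rw [hx, PySem.List.enumerate_cons]
    set n := PySem.Str.strip x with hn
    have hsplit : pre ++ n :: xs.map PySem.Str.strip = (pre ++ [n]) ++ xs.map PySem.Str.strip := by
      simp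
    have hlen : ((pre.length : Int) + 1) = ((pre ++ [n]).length : Int) := by
      simp
    by_cases hne : n = ""
    · -- empty: head filtered out on both sides
      rw [List.filter_cons]
      have : (!(n == "")
          && ((PySem.List.index? (pre ++ n :: xs.map PySem.Str.strip) n).map (fun k => (k : Int)) == some (pre.length : Int))
          && q n) = false := by simp [hne]
      rw [this]
      simp only [Bool.false_eq_true]
      rw [if_neg not_false, hsplit, hlen, ih (pre ++ [n]) seen ?_]
      · simp only [pvDedup]
        rw [if_pos (by simp [← hn, hne])]
      · intro s hs
        rw [hseen s hs]
        constructor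
        · intro h; exact List.mem_append_left _ h
        · intro h
          rcases List.mem_append.mp h with h | h
          · exact h
          · exact absurd ((List.mem_singleton.mp h).trans hne) hs
    · by_cases hmem : PySem.Set.contains seen n = true
      · -- already seen: n ∈ pre, so index? ≠ pre.length
        have hpre : n ∈ pre := (hseen n hne).mp hmem
        rw [List.filter_cons]
        have hidx : PySem.List.index? (pre ++ n :: xs.map PySem.Str.strip) n
            = PySem.List.index? pre n := PySem.List.index?_append_of_mem _ hpre
        have hlt : ∀ k, PySem.List.index? pre n = some k → k < pre.length := by
          intro k hk
          obtain ⟨hk', _, _⟩ := PySem.List.getElem_of_index?_eq_some hk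
          exact hk'
        have hcond : (!(n == "")
            && ((PySem.List.index? (pre ++ n :: xs.map PySem.Str.strip) n).map (fun k => (k : Int)) == some (pre.length : Int))
            && q n) = false := by
          rw [hidx]
          cases hik : PySem.List.index? pre n with
          | none =>
            exfalso
            have hs := (PySem.List.index?_isSome_iff _ _).mpr hpre
            rw [hik] at hs
            simp at hs
          | some k =>
            have hklt := hlt k hik
            have hik' : (k : Int) ≠ (pre.length : Int) := by omega
            simp [hik']
        rw [hcond]
        simp only [Bool.false_eq_true]
        rw [if_neg not_false, hsplit, hlen, ih (pre ++ [n]) seen ?_]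
        · simp only [pvDedup]
          rw [if_pos (by simp [← hn]; exact Or.inr ((PySem.Set.contains_iff _ _).mp hmem))]
        · intro s hs; rw [hseen s hs]
          constructor
          · intro h; exact List.mem_append_left _ h
          · intro h
            rcases List.mem_append.mp h with h | h
            · exact h
            · exact ((List.mem_singleton.mp h) ▸ hpre)
      · -- new non-empty name: index? hits exactly here
        have hpre : n ∉ pre := fun h => hmem ((hseen n hne).mpr h)
        have hidx : PySem.List.index? (pre ++ n :: xs.map PySem.Str.strip) n = some pre.length := by
          rw [PySem.List.index?_eq_some_iff]
          exact ⟨pre, xs.map PySem.Str.strip, rfl, rfl, hpre⟩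
        rw [List.filter_cons]
        have hcond : (!(n == "")
            && ((PySem.List.index? (pre ++ n :: xs.map PySem.Str.strip) n).map (fun k => (k : Int)) == some (pre.length : Int))
            && q n) = q n := by
          rw [hidx]
          simp [hne]
        rw [hcond]
        have htail :
            ((PySem.List.enumerate (xs.map PySem.Str.strip) ((pre.length : Int) + 1)).filter
              (fun p => !(p.2 == "")
                && ((PySem.List.index? (pre ++ n :: xs.map PySem.Str.strip) p.2).map (fun k => (k : Int)) == some p.1)
                && q p.2)).map (·.2)
            = (pvDedup (PySem.Set.add seen n) xs).filter q := by
          rw [hsplit, hlen]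
          refine ih (pre ++ [n]) (PySem.Set.add seen n) ?_
          intro s hs
          have h1 := hseen s hs
          constructor
          · intro h
            rcases (PySem.Set.mem_add _ _ _).mp ((PySem.Set.contains_iff _ _).mp h) with h | h
            · exact List.mem_append_left _ (h1.mp ((PySem.Set.contains_iff _ _).mpr h))
            · exact List.mem_append_right _ (by simp [h])
          · intro h
            rcases List.mem_append.mp h with h | h
            · exact (PySem.Set.contains_iff _ _).mpr ((PySem.Set.mem_add _ _ _).mpr (Or.inl ((PySem.Set.contains_iff _ _).mp (h1.mpr h))))
            · exact (PySem.Set.contains_iff _ _).mpr ((PySem.Set.mem_add _ _ _).mpr (Or.inr (List.mem_singleton.mp h)))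
        have hded : (pvDedup seen (x :: xs)).filter q
            = (n :: pvDedup (PySem.Set.add seen n) xs).filter q := by
          simp only [pvDedup]
          rw [if_neg (by simp [← hn, hne]; exact fun h => hmem ((PySem.Set.contains_iff _ _).mpr h))]
        rw [hded, List.filter_cons]
        by_cases hq : q n = true
        · rw [if_pos (by simp [hq]), if_pos (by simp [hq])]
          simp only [List.map_cons]
          rw [htail]
        · rw [if_neg (by simp [hq]), if_neg (by simp [hq])]
          exact htail

-- the setdefault fold computes the first-occurrence index of every present name
theorem pv_first_get? (L : List String) (s : String) : ∀ (k : Int) (d : PySem.Dict String Int),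
    PySem.Dict.get? ((PySem.List.enumerate L k).foldl
      (fun d p => if PySem.Dict.contains d p.2 then d else PySem.Dict.insert d p.2 p.1) d) s
    = if PySem.Dict.contains d s then PySem.Dict.get? d s
      else (PySem.List.index? L s).map (fun (j : Nat) => k + (j : Int)) := by
  induction L with
  | nil =>
    intro k d
    simp only [PySem.List.enumerate_nil, List.foldl_nil]
    split_ifs with h
    · rfl
    · have h0 : PySem.Dict.get? d s = none := by
        rw [PySem.Dict.get?_eq_none_iff_contains]
        exact Bool.eq_false_iff.mpr h
      simp [h0]
  | cons x xs ih =>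
    intro k d
    simp only [PySem.List.enumerate_cons, List.foldl_cons]
    rw [ih]
    have hmap : ∀ o : Option Nat,
        ((o.map (fun j : Nat => j + 1)).map (fun j : Nat => k + (j : Int)))
        = o.map (fun j : Nat => (k + 1) + (j : Int)) := by
      intro o; cases o <;> simp <;> omega
    by_cases hx : PySem.Dict.contains d x = true
    · rw [if_pos hx]
      by_cases hd : PySem.Dict.contains d s = true
      · rw [if_pos hd, if_pos hd]
      · rw [if_neg hd, if_neg hd]
        have hsx : s ≠ x := fun e => hd (e ▸ hx)
        rw [PySem.List.index?_cons_of_ne _ (Ne.symm hsx)]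
        exact (hmap _).symm
    · rw [if_neg hx]
      by_cases hsx : s = x
      · subst hsx
        have h1 : PySem.Dict.contains (PySem.Dict.insert d s k) s = true := by
          rw [PySem.Dict.contains_insert]; simp
        rw [if_pos h1, if_neg hx, PySem.Dict.get?_insert_self, PySem.List.index?_cons_self]
        simp
      · have h1 : PySem.Dict.contains (PySem.Dict.insert d x k) s = PySem.Dict.contains d s := by
          rw [PySem.Dict.contains_insert]; simp [hsx]
        rw [h1]
        by_cases hd : PySem.Dict.contains d s = true
        · rw [if_pos hd, if_pos hd, PySem.Dict.get?_insert_of_ne _ _ hsx]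
        · rw [if_neg hd, if_neg hd, PySem.List.index?_cons_of_ne _ (Ne.symm hsx)]
          exact (hmap _).symm

theorem pv_firstIndex_get? (L : List String) (s : String) :
    PySem.Dict.get? (pvFirstIndex L) s
      = (PySem.List.index? L s).map (fun (j : Nat) => (j : Int)) := by
  unfold pvFirstIndex
  rw [pv_first_get? L s 0 PySem.Dict.empty]
  rw [if_neg (by rw [PySem.Dict.contains_empty]; exact Bool.false_ne_true)]
  cases hik : PySem.List.index? L s <;> simp

-- the dict test 'first_index[s] == i' coincides with the index? test
theorem pv_swap (ar : List (List (String × String))) (rtl : List String) (p : Int × String) :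
    (!(p.2 == "")
      && (PySem.Dict.get? (pvFirstIndex (rtl.map PySem.Str.strip)) p.2 == some p.1)
      && PySem.Set.contains (pvAvailSet ar) p.2)
    = (!(p.2 == "")
      && ((PySem.List.index? (rtl.map PySem.Str.strip) p.2).map (fun k => (k : Int)) == some p.1)
      && PySem.Set.contains (pvAvailSet ar) p.2) := by
  rw [pv_firstIndex_get?]
  cases hik : PySem.List.index? (rtl.map PySem.Str.strip) p.2 <;> simp [hik]

-- ===== VERDICT (by name: the statement is the Claim_ definition above) =====
theorem normalize_relevant_tables_spec : Claim_equal_normalize_relevant_tables := by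
  intro rtl ar _
  show normalize_relevant_tables rtl ar = normalize_relevant_tables_alt rtl ar
  unfold normalize_relevant_tables normalize_relevant_tables_alt normalize_table_names
  have hA := pv_foldA rtl [] PySem.Set.empty
  simp only [hA, List.nil_append]
  have hcore := pv_core (fun t => PySem.Set.contains (pvAvailSet ar) t) rtl [] PySem.Set.empty
    (by intro s _; simp [PySem.Set.empty, PySem.Set.contains])
  rw [List.filter_congr (fun p _ => pv_swap ar rtl p)]
  simpa using hcore.symm
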